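-- pv_equiv track=rewrite | github.com/tomduck/bassclef | bassclef/postprocess.py | tidy_html
-- ===== SOURCE A (Python) =====
-- def tidy_html(lines):
--     """Aesthetic improvements to pandoc's html output."""
--
--     # Don't allow multiple meta tags on the same line in <head> ... </head>
--     newlines = []
--     flag = False
--     for line in lines:
--         if line.strip().startswith('<head>'):
--             flag = True
--         if flag and line.strip().startswith('<meta') and \
--           line.count('<meta') > 2:
--             indent = ' ' * (len(line) - len(line.lstrip(' ')))
--             lines = [indent + '<meta ' + s.strip() + '\n' \
--                      for s in line.split('<meta')[1:]]
--             newlines += lines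
--         elif line.strip().startswith('</head>'):
--             flag = False
--             newlines.append(line)
--         else:
--             newlines.append(line)
--     lines = newlines
--
--     # Write unordered lists on multiple lines (fixes social widgets html)
--     newlines = []
--     for line in lines:
--         if line.strip().startswith('<ul>') and line.strip().endswith('</ul>'):
--             indent = ' ' * (len(line) - len(line.lstrip(' ')))
--             line = line.replace('<ul>', '').replace('</ul>', '').strip()
--             lines = [indent + '  <li>' + s + '\n' \
--                      for s in [x for x in line.split('<li>') if x]]
--             newlines.append(indent + '<ul>\n')
--             newlines += lines
--             newlines.append(indent + '</ul>\n')
--         else: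
--             newlines.append(line)
--     lines = newlines
--
--     return lines
-- ===== SOURCE B (Python) =====
-- def _indent_of(line):
--     """The leading-space prefix of line, found by scanning."""
--     for i, ch in enumerate(line):
--         if ch != ' ':
--             return line[:i]
--     return line
--
--
-- def _ul_lines(line):
--     """Lines to emit for one line: a one-line <ul>...</ul> becomes a trio."""
--     t = line.strip()
--     if not (t.startswith('<ul>') and t.endswith('</ul>')):
--         return [line]
--     pad = _indent_of(line)
--     body = line.replace('<ul>', '').replace('</ul>', '').strip()
--     items = [pad + '<ul>\n']
--     for piece in body.split('<li>'):
--         if piece: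
--             items.append(pad + '  <li>' + piece + '\n')
--     items.append(pad + '</ul>\n')
--     return items
--
--
-- def tidy_html(lines):
--     """Aesthetic improvements to pandoc's html output (single fused pass)."""
--     out = []
--     flag = False
--     for line in lines:
--         t = line.strip()
--         if t.startswith('<head>'):
--             flag = True
--         if flag and t.startswith('<meta') and line.count('<meta') > 2:
--             pad = _indent_of(line)
--             for piece in line.split('<meta')[1:]:
--                 out.extend(_ul_lines(pad + '<meta ' + piece.strip() + '\n'))
--         else:
--             if t.startswith('</head>'):
--                 flag = False
--             out.extend(_ul_lines(line))
--     return out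
-- ===== Notes on version B (the rewrite author's own statement) =====
-- stated objective: alternative
-- what changed: A's two sequential whole-list rewriting passes (meta-splitting into an intermediate list, then ul-expansion) become one fused pass over the input: each line's meta-split pieces are immediately ul-expanded into the single output list; the indent is taken as the scanned leading-space prefix instead of ' '*(len-len(lstrip)), and the <li> items are accumulated in an explicit loop instead of a filter comprehension.
import Mathlib
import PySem

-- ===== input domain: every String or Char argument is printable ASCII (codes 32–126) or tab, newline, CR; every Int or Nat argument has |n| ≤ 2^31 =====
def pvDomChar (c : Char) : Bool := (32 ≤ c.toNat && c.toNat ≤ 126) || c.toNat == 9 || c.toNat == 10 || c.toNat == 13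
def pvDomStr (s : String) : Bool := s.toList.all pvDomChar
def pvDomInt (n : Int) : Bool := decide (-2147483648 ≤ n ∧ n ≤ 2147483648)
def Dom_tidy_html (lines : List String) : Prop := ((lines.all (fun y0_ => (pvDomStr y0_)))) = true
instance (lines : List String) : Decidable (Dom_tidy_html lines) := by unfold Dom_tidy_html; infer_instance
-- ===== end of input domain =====

-- B fuses A's two list-rewriting passes into one single pass over the input lines; objective: alternative decomposition (same cost).

-- ===== PORT A =====
-- s.lstrip(' ') : removes exactly the leading space characters (hand port, exact: only ' ' is stripped)
def pyLstripSp (s : String) : String := String.ofList (s.toList.dropWhile (fun c => c == ' '))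
-- ' ' * n for the nonnegative count n (len - len(lstrip) is always ≥ 0, so toNat is exact)
def pySpaces (n : Int) : String := String.ofList (List.replicate n.toNat ' ')
-- s.split(sep) for a nonempty literal sep (split? is none only for sep = "")
def pySplit (s sep : String) : List String := (PySem.Str.split? s sep).getD []

-- first loop of A: state (newlines, flag)
def tidyStep1 (st : List String × Bool) (line : String) : List String × Bool :=
  let flag := if PySem.Str.startswith (PySem.Str.strip line) "<head>" then true else st.2
  if flag && PySem.Str.startswith (PySem.Str.strip line) "<meta"
      && decide (2 < PySem.Str.count line "<meta") then
    let indent := pySpaces (PySem.Str.len line - PySem.Str.len (pyLstripSp line))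
    let metas := (PySem.List.slice (pySplit line "<meta") (some 1) none).map
        (fun s => indent ++ "<meta " ++ PySem.Str.strip s ++ "\n")
    (st.1 ++ metas, flag)
  else if PySem.Str.startswith (PySem.Str.strip line) "</head>" then
    (st.1 ++ [line], false)
  else
    (st.1 ++ [line], flag)

-- second loop of A: state newlines
def tidyStep2 (acc : List String) (line : String) : List String :=
  if PySem.Str.startswith (PySem.Str.strip line) "<ul>"
      && PySem.Str.endswith (PySem.Str.strip line) "</ul>" then
    let indent := pySpaces (PySem.Str.len line - PySem.Str.len (pyLstripSp line))
    let line2 := PySem.Str.strip (PySem.Str.replace (PySem.Str.replace line "<ul>" "") "</ul>" "")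
    let lis := ((pySplit line2 "<li>").filter (fun x => !(x == ""))).map
        (fun s => indent ++ "  <li>" ++ s ++ "\n")
    acc ++ [indent ++ "<ul>\n"] ++ lis ++ [indent ++ "</ul>\n"]
  else acc ++ [line]

def tidy_html (lines : List String) : List String :=
  ((lines.foldl tidyStep1 ([], false)).1).foldl tidyStep2 []

-- ===== PORT B =====
-- Source B _indent_of's scan ('for i, ch in enumerate: if ch != ' ': return line[:i]'), on the char list
def indentChars : List Char → List Char
  | [] => []
  | c :: rest => if c ≠ ' ' then [] else c :: indentChars rest

def indentOf (line : String) : String := String.ofList (indentChars line.toList)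

-- Source B _ul_lines(line)
def ulLines (line : String) : List String :=
  let t := PySem.Str.strip line
  if !(PySem.Str.startswith t "<ul>" && PySem.Str.endswith t "</ul>") then [line]
  else
    let pad := indentOf line
    let body := PySem.Str.strip (PySem.Str.replace (PySem.Str.replace line "<ul>" "") "</ul>" "")
    let items := (((PySem.Str.split? body "<li>").getD []).foldl
        (fun acc piece => if !(piece == "") then acc ++ [pad ++ "  <li>" ++ piece ++ "\n"] else acc)
        [pad ++ "<ul>\n"])
    items ++ [pad ++ "</ul>\n"]

-- Source B tidy_html's fused loop body: one input line updates (out, flag)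
def tidyStepB (st : List String × Bool) (line : String) : List String × Bool :=
  let t := PySem.Str.strip line
  let flag := if PySem.Str.startswith t "<head>" then true else st.2
  if flag && PySem.Str.startswith t "<meta" && decide (2 < PySem.Str.count line "<meta") then
    let pad := indentOf line
    ((PySem.List.slice ((PySem.Str.split? line "<meta").getD []) (some 1) none).foldl
        (fun out piece => out ++ ulLines (pad ++ "<meta " ++ PySem.Str.strip piece ++ "\n")) st.1,
     flag)
  else
    let flag2 := if PySem.Str.startswith t "</head>" then false else flag
    (st.1 ++ ulLines line, flag2)

def tidy_html_alt (lines : List String) : List String :=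
  (lines.foldl tidyStepB ([], false)).1

-- ===== PRECONDITION & SPEC =====
def Spec_tidy_html (lines : List String) (out : List String) : Prop := out = tidy_html_alt lines
instance (lines : List String) (out : List String) : Decidable (Spec_tidy_html lines out) := by unfold Spec_tidy_html; infer_instance

-- ===== CLAIM (what is proved, stated in full; the proofs are below) =====
def Claim_equal_tidy_html : Prop := ∀ (lines : List String), Dom_tidy_html lines → Spec_tidy_html lines (tidy_html lines)

-- ===== LEMMAS AND PROOFS =====

-- B's scanned leading-space prefix is A's ' ' * (len - len(lstrip(' ')))
theorem indentChars_eq (cs : List Char) :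
    indentChars cs = List.replicate (cs.length - (cs.dropWhile (fun c => c == ' ')).length) ' ' := by
  induction cs with
  | nil => simp [indentChars]
  | cons c rest ih =>
      by_cases h : c = ' '
      · subst h
        have hd : List.dropWhile (fun c => c == ' ') (' ' :: rest)
            = List.dropWhile (fun c => c == ' ') rest := by simp
        have hle := List.length_dropWhile_le (p := fun c => c == ' ') (l := rest)
        simp only [indentChars, if_neg (by simp : ¬(' ' ≠ ' ')), hd, List.length_cons,
          Nat.succ_sub hle, List.replicate_succ, ih]
      · have hd : List.dropWhile (fun c => c == ' ') (c :: rest) = c :: rest := by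
          simp [h]
        simp [indentChars, h, hd]

theorem indentOf_eq (line : String) :
    indentOf line = pySpaces (PySem.Str.len line - PySem.Str.len (pyLstripSp line)) := by
  unfold indentOf pySpaces pyLstripSp
  rw [indentChars_eq]
  congr 1
  have hle := List.length_dropWhile_le (p := fun c => c == ' ') (l := line.toList)
  simp [PySem.Str.len_eq]

-- B's ul expansion is A's pass-2 body
theorem ulLines_eq (acc : List String) (line : String) :
    tidyStep2 acc line = acc ++ ulLines line := by
  unfold tidyStep2 ulLines
  simp only [indentOf_eq, PySem.List.foldl_append_if]
  split_ifs with h1 h2 <;> simp_all [pySplit]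

-- the meta lines A's pass-1 emits for one meta line (pass-1 loop body, characterised)
def metaLines (line : String) : List String :=
  (PySem.List.slice (pySplit line "<meta") (some 1) none).map
    (fun s => pySpaces (PySem.Str.len line - PySem.Str.len (pyLstripSp line))
              ++ "<meta " ++ PySem.Str.strip s ++ "\n")

-- condition of the meta branch, and the new flag, per line
def metaFlag (flag : Bool) (line : String) : Bool :=
  if PySem.Str.startswith (PySem.Str.strip line) "<head>" then true else flag
def metaCond (flag : Bool) (line : String) : Bool :=
  metaFlag flag line && PySem.Str.startswith (PySem.Str.strip line) "<meta"
    && decide (2 < PySem.Str.count line "<meta")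

-- pure recursion computing A's pass-1 output lines and final flag
def metaRec (flag : Bool) : List String → List String × Bool
  | [] => ([], flag)
  | l :: ls =>
      let f1 := metaFlag flag l
      let here := if metaCond flag l then metaLines l else [l]
      let f2 := if !(metaCond flag l) && PySem.Str.startswith (PySem.Str.strip l) "</head>"
                then false else f1
      let r := metaRec f2 ls
      (here ++ r.1, r.2)

theorem tidyStep1_eq (st : List String × Bool) (line : String) :
    tidyStep1 st line
      = (st.1 ++ (if metaCond st.2 line then metaLines line else [line]),
         if !(metaCond st.2 line) && PySem.Str.startswith (PySem.Str.strip line) "</head>"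
         then false else metaFlag st.2 line) := by
  obtain ⟨a, f⟩ := st
  unfold tidyStep1 metaCond metaFlag metaLines
  cases f <;>
  by_cases h1 : PySem.Str.startswith (PySem.Str.strip line) "<head>" = true <;>
  by_cases h2 : PySem.Str.startswith (PySem.Str.strip line) "<meta" = true <;>
  by_cases h3 : (2 < PySem.Str.count line "<meta") <;>
  by_cases h4 : PySem.Str.startswith (PySem.Str.strip line) "</head>" = true <;>
  simp only [h1, h2, h3, h4, Bool.not_false, Bool.not_true, decide_true, decide_false,
    Bool.and_true, Bool.and_false, Bool.and_self, if_true, if_false, Bool.false_eq_true]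

theorem foldl_step1 (ls : List String) (acc : List String) (flag : Bool) :
    ls.foldl tidyStep1 (acc, flag) = (acc ++ (metaRec flag ls).1, (metaRec flag ls).2) := by
  induction ls generalizing acc flag with
  | nil => simp [metaRec]
  | cons l ls ih =>
      simp only [List.foldl_cons, tidyStep1_eq, metaRec]
      rw [ih]
      simp

theorem foldl_step2 (xs acc : List String) :
    xs.foldl tidyStep2 acc = acc ++ xs.flatMap ulLines := by
  induction xs generalizing acc with
  | nil => simp
  | cons x xs ih =>
      rw [List.foldl_cons, ulLines_eq, ih]
      simp

-- B's whole loop computes pass 2 applied to pass 1's output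
theorem foldl_stepB (ls : List String) : ∀ (acc : List String) (flag : Bool),
    ls.foldl tidyStepB (acc, flag)
      = (acc ++ ((metaRec flag ls).1).flatMap ulLines, (metaRec flag ls).2) := by
  induction ls with
  | nil => intro acc flag; simp [metaRec]
  | cons l ls ih =>
      intro acc flag
      rw [List.foldl_cons]
      by_cases hm : metaCond flag l = true
      · have hm' : ((if PySem.Str.startswith (PySem.Str.strip l) "<head>" = true then true else flag)
            && PySem.Str.startswith (PySem.Str.strip l) "<meta"
            && decide (2 < PySem.Str.count l "<meta")) = true := by
          simpa [metaCond, metaFlag] using hm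
        simp only [tidyStepB]
        rw [if_pos hm']
        simp only [PySem.List.foldl_append_eq_flatMap]
        rw [ih]
        simp [metaRec, hm, metaLines, metaFlag, indentOf_eq, pySplit,
          List.flatMap_map, List.flatMap_append]
      · have hm' : ((if PySem.Str.startswith (PySem.Str.strip l) "<head>" = true then true else flag)
            && PySem.Str.startswith (PySem.Str.strip l) "<meta"
            && decide (2 < PySem.Str.count l "<meta")) = false := by
          simpa [metaCond, metaFlag] using hm
        have hmb : metaCond flag l = false := by simpa using hm
        simp only [tidyStepB]
        rw [if_neg (by rw [hm']; exact Bool.false_ne_true)]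
        rw [ih]
        by_cases hh : PySem.Chars.startswith (PySem.Chars.strip l.toList)
            ['<', '/', 'h', 'e', 'a', 'd', '>'] = true
        · simp [metaRec, hmb, hh]
        · have hhb : PySem.Chars.startswith (PySem.Chars.strip l.toList)
              ['<', '/', 'h', 'e', 'a', 'd', '>'] = false := by simpa using hh
          simp [metaRec, hmb, hhb, metaFlag]

-- ===== VERDICT (by name: the statement is the Claim_ definition above) =====
theorem tidy_html_spec : Claim_equal_tidy_html := by
  intro lines _
  unfold Spec_tidy_html tidy_html tidy_html_alt
  rw [foldl_step1, foldl_step2, foldl_stepB]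
  simp
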